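-- pv_equiv track=rewrite | github.com/jtalati0070/route_optimization | OR_based_generate_routes.py | balanced_assignment
-- ===== SOURCE A (Python) =====
-- def balanced_assignment(customers, vehicle_count):
--     customer_list = list(range(1, len(customers)))
--     customer_list.sort(key=lambda cid: customers[cid]["priority"], reverse=True)
--
--     n = len(customer_list)
--     high = customer_list[: n // 3]
--     medium = customer_list[n // 3 : 2 * n // 3]
--     low = customer_list[2 * n // 3 :]
--
--     vehicle_customers = [[] for _ in range(vehicle_count)]
--
--     def rr(group):
--         v = 0
--         for c in group:
--             vehicle_customers[v % vehicle_count].append(c)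
--             v += 1
--
--     rr(high)
--     rr(medium)
--     rr(low)
--
--     return vehicle_customers
-- ===== SOURCE B (Python) =====
-- def balanced_assignment(customers, vehicle_count):
--     order = sorted(range(1, len(customers)),
--                    key=lambda cid: customers[cid]["priority"], reverse=True)
--     n = len(order)
--     high = order[: n // 3]
--     medium = order[n // 3 : 2 * n // 3]
--     low = order[2 * n // 3 :]
--
--     def take(group, v):
--         return [c for i, c in enumerate(group) if i % vehicle_count == v]
--
--     return [take(high, v) + take(medium, v) + take(low, v)
--             for v in range(vehicle_count)]
-- ===== Notes on version B (the rewrite author's own statement) =====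
-- stated objective: alternative
-- what changed: Replaces A's stateful round-robin scatter (mutating a shared list of buckets with a running counter modulo vehicle_count) by a per-vehicle gather: for each vehicle v it filters each priority group by index mod vehicle_count, building every bucket independently without mutation.
import Mathlib
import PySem

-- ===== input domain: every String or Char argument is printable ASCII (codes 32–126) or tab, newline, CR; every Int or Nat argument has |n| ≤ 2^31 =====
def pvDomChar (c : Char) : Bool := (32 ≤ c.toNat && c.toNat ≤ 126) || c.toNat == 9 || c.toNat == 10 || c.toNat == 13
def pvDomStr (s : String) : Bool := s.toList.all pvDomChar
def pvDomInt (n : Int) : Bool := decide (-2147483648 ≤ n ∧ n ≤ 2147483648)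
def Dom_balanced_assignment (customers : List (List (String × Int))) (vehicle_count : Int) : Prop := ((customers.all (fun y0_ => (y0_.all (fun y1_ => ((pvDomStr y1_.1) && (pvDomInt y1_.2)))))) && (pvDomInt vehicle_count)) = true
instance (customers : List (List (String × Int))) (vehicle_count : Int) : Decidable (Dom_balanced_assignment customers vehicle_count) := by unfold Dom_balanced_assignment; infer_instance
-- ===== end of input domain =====

-- B replaces A's stateful round-robin scatter with a mutation-free per-vehicle gather
-- (filter each priority group by index mod vehicle_count); alternative decomposition, no speed claim.

-- shared helper: customers[cid]["priority"] (default unreachable under Pre_)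
def pvPrio (customers : List (List (String × Int))) (cid : Int) : Int :=
  (PySem.Dict.mk ((PySem.List.pyGet? customers cid).getD [])).getD "priority" 0

-- ===== PORT A =====
def balanced_assignment (customers : List (List (String × Int))) (vehicle_count : Int) : List (List Int) :=
  -- customer_list = list(range(1, len(customers))); customer_list.sort(key=..., reverse=True)
  let customer_list := PySem.List.sorted (PySem.List.pyRange 1 (customers.length : Int) 1)
                         (fun cid => pvPrio customers cid) true
  let n : Int := (customer_list.length : Int)
  let high := PySem.List.slice customer_list none (some (PySem.Int.floordiv n 3))
  let medium := PySem.List.slice customer_list (some (PySem.Int.floordiv n 3)) (some (PySem.Int.floordiv (2 * n) 3))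
  let low := PySem.List.slice customer_list (some (PySem.Int.floordiv (2 * n) 3)) none
  -- vehicle_customers = [[] for _ in range(vehicle_count)]
  let init : List (List Int) := List.replicate vehicle_count.toNat []
  -- def rr(group): v = 0; for c in group: vehicle_customers[v % vehicle_count].append(c); v += 1
  let rr := fun (acc : List (List Int)) (group : List Int) =>
    (group.foldl (fun (st : List (List Int) × Int) c =>
        (st.1.modify (PySem.Int.mod st.2 vehicle_count).toNat (fun l => l ++ [c]), st.2 + 1))
      (acc, 0)).1
  rr (rr (rr init high) medium) low

-- ===== PORT B =====
-- take(group, v) = [c for i, c in enumerate(group) if i % vehicle_count == v]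
def pvTake (vehicle_count : Int) (group : List Int) (v : Int) : List Int :=
  ((PySem.List.enumerate group 0).filter (fun ic => PySem.Int.mod ic.1 vehicle_count == v)).map (fun ic => ic.2)

def balanced_assignment_alt (customers : List (List (String × Int))) (vehicle_count : Int) : List (List Int) :=
  let order := PySem.List.sorted (PySem.List.pyRange 1 (customers.length : Int) 1)
                 (fun cid => pvPrio customers cid) true
  let n : Int := (order.length : Int)
  let high := PySem.List.slice order none (some (PySem.Int.floordiv n 3))
  let medium := PySem.List.slice order (some (PySem.Int.floordiv n 3)) (some (PySem.Int.floordiv (2 * n) 3))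
  let low := PySem.List.slice order (some (PySem.Int.floordiv (2 * n) 3)) none
  (PySem.List.pyRange 0 vehicle_count 1).map
    (fun v => pvTake vehicle_count high v ++ pvTake vehicle_count medium v ++ pvTake vehicle_count low v)

-- ===== PRECONDITION & SPEC =====
-- Pre_ excludes the inputs on which A raises: a customer at index ≥ 1 without a "priority"
-- key (KeyError in the sort), and vehicle_count ≤ 0 with at least 2 customers
-- (ZeroDivisionError / IndexError in rr).
def Pre_balanced_assignment (customers : List (List (String × Int))) (vehicle_count : Int) : Prop :=
  ((customers.drop 1).all (fun d => PySem.Dict.contains (PySem.Dict.mk d) "priority")) = true ∧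
  (1 ≤ vehicle_count ∨ customers.length ≤ 1)
instance (customers : List (List (String × Int))) (vehicle_count : Int) : Decidable (Pre_balanced_assignment customers vehicle_count) := by unfold Pre_balanced_assignment; infer_instance

def pvWitness_balanced_assignment : (List (List (String × Int))) × Int :=
  ([[("name", 0)], [("priority", 3)], [("priority", 1)], [("priority", 2)]], 2)

def Spec_balanced_assignment (customers : List (List (String × Int))) (vehicle_count : Int) (out : List (List Int)) : Prop := out = balanced_assignment_alt customers vehicle_count
instance (customers : List (List (String × Int))) (vehicle_count : Int) (out : List (List Int)) : Decidable (Spec_balanced_assignment customers vehicle_count out) := by unfold Spec_balanced_assignment; infer_instance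

-- ===== CLAIM (what is proved, stated in full; the proofs are below) =====
def Claim_equal_balanced_assignment : Prop := ∀ (customers : List (List (String × Int))) (vehicle_count : Int), Dom_balanced_assignment customers vehicle_count → Pre_balanced_assignment customers vehicle_count → Spec_balanced_assignment customers vehicle_count (balanced_assignment customers vehicle_count)

-- ===== LEMMAS AND PROOFS =====

-- what vehicle j collects from a group scattered round-robin starting at counter v0
def pvGat (vc v0 : Int) (j : Nat) : List Int → List Int
  | [] => []
  | c :: g => (if (PySem.Int.mod v0 vc).toNat = j then [c] else []) ++ pvGat vc (v0 + 1) j g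

theorem pv_modify_mapIdx {α β : Type} (acc : List α) (i : Nat) (f : α → α) (g : Nat → α → β) :
    (acc.modify i f).mapIdx g = acc.mapIdx (fun j a => if i = j then g j (f a) else g j a) := by
  apply List.ext_getElem
  · simp
  · intro j h1 h2
    simp only [List.getElem_mapIdx, List.getElem_modify]
    split <;> rfl

theorem pv_mapIdx_mapIdx {α β γ : Type} (acc : List α) (F : Nat → α → β) (G : Nat → β → γ) :
    (acc.mapIdx F).mapIdx G = acc.mapIdx (fun j a => G j (F j a)) := by
  apply List.ext_getElem
  · simp
  · intro j h1 h2; simp [List.getElem_mapIdx]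

-- the scatter loop characterised as an independent per-index gather
theorem pv_scatter (vc : Int) (g : List Int) :
    ∀ (acc : List (List Int)) (v0 : Int),
    (g.foldl (fun (st : List (List Int) × Int) c =>
        (st.1.modify (PySem.Int.mod st.2 vc).toNat (fun l => l ++ [c]), st.2 + 1)) (acc, v0)).1
      = acc.mapIdx (fun j a => a ++ pvGat vc v0 j g) := by
  induction g with
  | nil =>
      intro acc v0
      simp [pvGat]
      apply List.ext_getElem <;> simp [List.getElem_mapIdx]
  | cons c g ih =>
      intro acc v0
      simp only [List.foldl_cons]
      rw [ih, pv_modify_mapIdx]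
      congr 1
      funext j a
      by_cases h : (PySem.Int.mod v0 vc).toNat = j <;> simp [pvGat, h, List.append_assoc]

theorem pv_take_eq_gat (vc : Int) (hvc : 0 < vc) (j : Nat) (_hj : (j : Int) < vc) (g : List Int) :
    ∀ (s : Int), 0 ≤ s →
      ((PySem.List.enumerate g s).filter (fun ic => PySem.Int.mod ic.1 vc == (j : Int))).map (fun ic => ic.2)
        = pvGat vc s j g := by
  induction g with
  | nil => intro s hs; simp [PySem.List.enumerate_nil, pvGat]
  | cons c g ih =>
      intro s hs
      rw [PySem.List.enumerate_cons]
      have hpos : 0 ≤ PySem.Int.mod s vc := by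
        rw [PySem.Int.mod_eq_emod_of_pos hvc]; exact Int.emod_nonneg s (by omega)
      have hiff : ((PySem.Int.mod s vc == (j : Int)) = true) ↔ ((PySem.Int.mod s vc).toNat = j) := by
        constructor
        · intro h; have := beq_iff_eq.mp h; omega
        · intro h; apply beq_iff_eq.mpr; omega
      by_cases h : (PySem.Int.mod s vc).toNat = j
      · rw [List.filter_cons_of_pos (by simpa [hiff] using h)]
        simp only [List.map_cons, pvGat, h]
        rw [ih (s + 1) (by omega)]; rfl
      · rw [List.filter_cons_of_neg (by simp [hiff, h])]
        simp only [pvGat, h]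
        exact ih (s + 1) (by omega)

theorem pv_mapIdx_replicate {β : Type} (k : Nat) (x : List Int) (f : Nat → List Int → β) :
    (List.replicate k x).mapIdx f = (List.range k).map (fun j => f j x) := by
  apply List.ext_getElem
  · simp
  · intro j h1 h2; simp [List.getElem_mapIdx]

-- the whole assembly: three round-robin scatters = per-vehicle gathers, for any groups
theorem pv_core (vc : Int) (h m l : List Int)
    (hcase : 1 ≤ vc ∨ (h = [] ∧ m = [] ∧ l = [])) :
    (l.foldl (fun (st : List (List Int) × Int) c =>
        (st.1.modify (PySem.Int.mod st.2 vc).toNat (fun x => x ++ [c]), st.2 + 1))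
      (((m.foldl (fun (st : List (List Int) × Int) c =>
        (st.1.modify (PySem.Int.mod st.2 vc).toNat (fun x => x ++ [c]), st.2 + 1))
      (((h.foldl (fun (st : List (List Int) × Int) c =>
        (st.1.modify (PySem.Int.mod st.2 vc).toNat (fun x => x ++ [c]), st.2 + 1))
      ((List.replicate vc.toNat [], 0) : List (List Int) × Int)).1, 0) : List (List Int) × Int)).1, 0) : List (List Int) × Int)).1
    = (PySem.List.pyRange 0 vc 1).map (fun v => pvTake vc h v ++ pvTake vc m v ++ pvTake vc l v) := by
  rcases hcase with hvc | ⟨hh, hm, hl⟩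
  · rw [pv_scatter, pv_scatter, pv_scatter, pv_mapIdx_mapIdx, pv_mapIdx_mapIdx,
        pv_mapIdx_replicate, PySem.List.pyRange_one]
    have hk : (vc - 0).toNat = vc.toNat := by omega
    rw [hk, List.map_map]
    apply List.map_congr_left
    intro j hj
    have hjlt : (j : Int) < vc := by
      have := List.mem_range.mp hj; omega
    simp only [Function.comp, zero_add, pvTake, List.nil_append]
    rw [pv_take_eq_gat vc (by omega) j hjlt h 0 (by omega),
        pv_take_eq_gat vc (by omega) j hjlt m 0 (by omega),
        pv_take_eq_gat vc (by omega) j hjlt l 0 (by omega), List.append_assoc]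
  · subst hh; subst hm; subst hl
    simp only [List.foldl_nil]
    rw [PySem.List.pyRange_one]
    apply List.ext_getElem
    · simp
    · intro j h1 h2
      simp [pvTake, PySem.List.enumerate_nil]

-- ===== VERDICT (by name: the statement is the Claim_ definition above) =====
theorem balanced_assignment_spec : Claim_equal_balanced_assignment := by
  intro customers vc _hdom hpre
  unfold Spec_balanced_assignment balanced_assignment balanced_assignment_alt
  rcases hpre with ⟨_hkeys, hvc⟩
  apply pv_core
  rcases hvc with hvc | hlen
  · exact Or.inl hvc
  · right
    have hnil : PySem.List.sorted (PySem.List.pyRange 1 (customers.length : Int) 1)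
        (fun cid => pvPrio customers cid) true = [] := by
      have : PySem.List.pyRange 1 (customers.length : Int) 1 = [] :=
        PySem.List.pyRange_one_eq_nil (by omega)
      rw [this]; rfl
    rw [hnil]
    refine ⟨rfl, rfl, rfl⟩
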